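-- pv_equiv track=rewrite | github.com/potatoHVAC/leetcode_challenges | algorithm/44.1_wildcard_matching.py | pattern_cleaner
-- ===== SOURCE A (Python) =====
-- def pattern_cleaner(pattern: str) -> str:
--     """Remove duplicate wild cards ('*') from pattern"""
--     if len(pattern) == 0:
--         return pattern
--
--     clean_pattern = pattern[0]
--     for c in pattern[1:]:
--         if c == '*' and c == clean_pattern[-1]:
--             pass
--         else:
--             clean_pattern += c
--
--     return clean_pattern
-- ===== SOURCE B (Python) =====
-- from itertools import groupby
--
-- def pattern_cleaner(pattern: str) -> str:
--     """Remove duplicate wild cards ('*') from pattern"""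
--     return ''.join('*' if k == '*' else ''.join(g) for k, g in groupby(pattern))
-- ===== Notes on version B (the rewrite author's own statement) =====
-- stated objective: idiomatic
-- what changed: Replaces the stateful char-by-char scan that compares each character with the accumulator's last character by an itertools.groupby pass over maximal runs of equal characters, collapsing each wildcard run to a single wildcard and keeping other runs whole.
import Mathlib
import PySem

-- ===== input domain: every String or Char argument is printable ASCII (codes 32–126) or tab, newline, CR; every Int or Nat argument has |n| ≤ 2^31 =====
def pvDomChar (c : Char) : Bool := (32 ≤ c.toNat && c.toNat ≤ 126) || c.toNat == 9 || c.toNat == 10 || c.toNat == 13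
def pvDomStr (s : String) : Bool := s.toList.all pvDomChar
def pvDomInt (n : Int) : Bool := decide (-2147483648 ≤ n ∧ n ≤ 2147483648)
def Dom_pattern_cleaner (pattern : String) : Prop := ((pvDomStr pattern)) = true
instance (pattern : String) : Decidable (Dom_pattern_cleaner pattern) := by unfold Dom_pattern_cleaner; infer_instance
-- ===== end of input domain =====

-- B replaces A's stateful last-character scan by a run-oriented groupby pass (idiomatic).

-- ===== PORT A =====
-- A: start with pattern[0], then for each following char append it unless it is '*'
-- equal to the last char of the accumulator.
def pattern_cleaner (pattern : String) : String :=
  match pattern.toList with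
  | [] => pattern
  | c0 :: rest =>
    String.mk (rest.foldl
      (fun clean c =>
        if c = '*' ∧ clean.getLast? = some c then clean else clean ++ [c])
      [c0])

-- ===== PORT B =====
-- maximal runs of equal characters, as itertools.groupby yields them (left to right)
def pcRuns : List Char → List (List Char)
  | [] => []
  | c :: rest =>
    (c :: rest.takeWhile (· = c)) :: pcRuns (rest.dropWhile (· = c))
termination_by l => l.length
decreasing_by
  simpa using Nat.lt_succ_of_le (List.length_dropWhile_le (· = c) rest)

def pattern_cleaner_alt (pattern : String) : String :=
  String.mk (((pcRuns pattern.toList).map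
    (fun r => if r.head? = some '*' then ['*'] else r)).flatten)

-- ===== PRECONDITION & SPEC =====
def Spec_pattern_cleaner (pattern : String) (out : String) : Prop := out = pattern_cleaner_alt pattern
instance (pattern : String) (out : String) : Decidable (Spec_pattern_cleaner pattern out) := by unfold Spec_pattern_cleaner; infer_instance

-- ===== CLAIM (what is proved, stated in full; the proofs are below) =====
def Claim_equal_pattern_cleaner : Prop := ∀ (pattern : String), Dom_pattern_cleaner pattern → Spec_pattern_cleaner pattern (pattern_cleaner pattern)

-- ===== LEMMAS AND PROOFS =====

-- common characterisation: result of processing `rest` when the last kept char is `d`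
def pcG : Char → List Char → List Char
  | _, [] => []
  | d, c :: r => if c = '*' ∧ d = c then pcG d r else c :: pcG c r

theorem pcA_foldl (rest : List Char) : ∀ (acc : List Char) (d : Char),
    rest.foldl
      (fun clean c =>
        if c = '*' ∧ clean.getLast? = some c then clean else clean ++ [c])
      (acc ++ [d]) = acc ++ [d] ++ pcG d rest := by
  induction rest with
  | nil => intro acc d; simp [pcG]
  | cons c r ih =>
    intro acc d
    by_cases h : c = '*' ∧ d = c
    · obtain ⟨hc, hd⟩ := h
      subst hc; subst hd
      have hcond : ('*' : Char) = '*' ∧ (acc ++ ['*']).getLast? = some '*' :=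
        ⟨rfl, by simp⟩
      rw [List.foldl_cons, if_pos hcond, ih acc '*']
      simp [pcG]
    · have hg : ¬ (c = '*' ∧ (acc ++ [d]).getLast? = some c) := by
        simp only [List.getLast?_concat, Option.some.injEq]
        exact h
      rw [List.foldl_cons, if_neg hg, ih (acc ++ [d]) c]
      simp [pcG, if_neg h]

theorem pcA_char (p : String) :
    pattern_cleaner p =
      String.mk (match p.toList with | [] => [] | d :: rest => d :: pcG d rest) := by
  unfold pattern_cleaner
  rcases hl : p.toList with _ | ⟨d, rest⟩
  · exact String.toList_inj.mp hl
  · have := pcA_foldl rest [] d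
    simp at this
    simp [this]

theorem pcG_star_run : ∀ (same other : List Char), (∀ x ∈ same, x = '*') →
    pcG '*' (same ++ other) = pcG '*' other := by
  intro same
  induction same with
  | nil => intro other _; simp
  | cons a s ih =>
    intro other h
    have ha : a = '*' := h a (by simp)
    simp [ha, pcG, ih other (fun x hx => h x (by simp [hx]))]

theorem pcG_keep_run (d : Char) (hd : d ≠ '*') : ∀ (same other : List Char),
    (∀ x ∈ same, x = d) → pcG d (same ++ other) = same ++ pcG d other := by
  intro same
  induction same with
  | nil => intro other _; simp
  | cons a s ih =>
    intro other h
    have ha : a = d := h a (by simp)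
    simp [pcG, ha, hd, ih other (fun x hx => h x (by simp [hx]))]

theorem pcG_head_ne (d : Char) : ∀ (other : List Char),
    (∀ e, other.head? = some e → e ≠ d) →
    pcG d other = (match other with | [] => [] | e :: r => e :: pcG e r) := by
  intro other h
  cases other with
  | nil => rfl
  | cons e r =>
    have : ¬ (e = '*' ∧ d = e) := by
      rintro ⟨_, h2⟩; exact h e rfl h2.symm
    simp [pcG, if_neg this]

theorem pcB_core : ∀ (n : ℕ) (l : List Char), l.length ≤ n →
    ((pcRuns l).map (fun r => if r.head? = some '*' then ['*'] else r)).flatten =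
      (match l with | [] => [] | d :: rest => d :: pcG d rest) := by
  intro n
  induction n with
  | zero => intro l hl; simp at hl; simp [hl, pcRuns]
  | succ n ih =>
    intro l hl
    cases l with
    | nil => simp [pcRuns]
    | cons d rest =>
      have hsplit : rest = rest.takeWhile (· = d) ++ rest.dropWhile (· = d) :=
        (List.takeWhile_append_dropWhile).symm
      have hsame : ∀ x ∈ rest.takeWhile (· = d), x = d := by
        intro x hx
        simpa using List.mem_takeWhile_imp hx
      have hhead : ∀ e, (rest.dropWhile (· = d)).head? = some e → e ≠ d := by
        intro e he
        have := List.head?_dropWhile_not (· = d) rest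
        rw [he] at this
        simpa using this
      have hlen : (rest.dropWhile (· = d)).length ≤ n := by
        have := List.length_dropWhile_le (· = d) rest
        simp at hl; omega
      have ihd := ih (rest.dropWhile (· = d)) hlen
      rw [pcRuns]
      by_cases hd : d = '*'
      · subst hd
        simp only [List.map_cons, List.flatten_cons, List.head?_cons]
        conv_rhs => rw [hsplit]
        rw [pcG_star_run _ _ hsame, pcG_head_ne '*' _ hhead, ihd]
        simp
      · have hh : ¬ ((d :: rest.takeWhile (· = d)).head? = some '*') := by
          simp [hd]
        simp only [List.map_cons, List.flatten_cons, if_neg hh]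
        conv_rhs => rw [hsplit]
        rw [pcG_keep_run d hd _ _ hsame, pcG_head_ne d _ hhead, ihd]
        simp

-- ===== VERDICT (by name: the statement is the Claim_ definition above) =====
theorem pattern_cleaner_spec : Claim_equal_pattern_cleaner := by
  intro pattern _
  unfold Spec_pattern_cleaner pattern_cleaner_alt
  rw [pcB_core pattern.toList.length pattern.toList le_rfl]
  exact pcA_char pattern
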